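-- pv_equiv track=rewrite | github.com/LeaderMalang/read-academic | OCRAPP/services/totalMarksFigures.py | extract_total_marks_in_figures
-- ===== SOURCE A (Python) =====
-- def extract_total_marks_in_figures(cleaned_texts):
--     extracted_info = {
--         "total_marks": None,
--         "obtained_marks": None,
--     }
--
--     # Array to store lines containing 'TOTAL'
--     for i, text in enumerate(cleaned_texts):
--
--         if "Total Marks" in text:
--             total_index = i
--             extracted_info["obtained_marks"] = cleaned_texts[total_index + 1]
--             extracted_info["total_marks"] = cleaned_texts[total_index + 2]
--
--     return extracted_info
-- ===== SOURCE B (Python) =====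
-- def extract_total_marks_in_figures(cleaned_texts):
--     for i in range(len(cleaned_texts) - 1, -1, -1):
--         if "Total Marks" in cleaned_texts[i]:
--             return {
--                 "total_marks": cleaned_texts[i + 2],
--                 "obtained_marks": cleaned_texts[i + 1],
--             }
--     return {"total_marks": None, "obtained_marks": None}
-- ===== Notes on version B (the rewrite author's own statement) =====
-- stated objective: idiomatic
-- what changed: B scans the list in reverse and returns immediately at the first (i.e. last-in-order) line containing 'Total Marks', instead of A's forward scan that overwrites a dict on every match until the end.
import Mathlib
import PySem

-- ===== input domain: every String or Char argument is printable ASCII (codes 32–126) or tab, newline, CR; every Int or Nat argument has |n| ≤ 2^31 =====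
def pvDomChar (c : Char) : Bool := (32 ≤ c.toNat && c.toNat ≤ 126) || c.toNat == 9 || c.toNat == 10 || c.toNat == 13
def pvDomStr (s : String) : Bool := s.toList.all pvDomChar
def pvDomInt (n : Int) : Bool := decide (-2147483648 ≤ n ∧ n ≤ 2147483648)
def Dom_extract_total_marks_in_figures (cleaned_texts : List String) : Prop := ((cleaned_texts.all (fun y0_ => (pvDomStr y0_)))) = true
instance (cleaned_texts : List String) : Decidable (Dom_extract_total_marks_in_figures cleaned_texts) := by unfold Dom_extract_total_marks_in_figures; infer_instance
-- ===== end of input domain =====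

-- B replaces A's forward scan (which overwrites the dict on every match) by a reverse scan
-- that stops at the first match from the end; objective: idiomatic early-exit search.

-- ===== PORT A =====
-- A: forward enumerate loop; on every line containing "Total Marks" overwrite both dict entries.
def extract_total_marks_in_figures (cleaned_texts : List String) : List (String × Option String) :=
  let extracted_info : PySem.Dict String (Option String) :=
    PySem.Dict.mk [("total_marks", none), ("obtained_marks", none)]
  let extracted_info :=
    (PySem.List.enumerate cleaned_texts).foldl
      (fun d p =>
        if PySem.Str.isIn "Total Marks" p.2 then
          (d.insert "obtained_marks" (PySem.List.pyGet? cleaned_texts (p.1 + 1))).insert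
            "total_marks" (PySem.List.pyGet? cleaned_texts (p.1 + 2))
        else d)
      extracted_info
  extracted_info.items

-- ===== PORT B =====
-- B: the loop 'for i in range(len-1, -1, -1)'; k+1 means current index k, counting down.
def pvAltLoop (cleaned_texts : List String) : Nat → List (String × Option String)
  | 0 => [("total_marks", none), ("obtained_marks", none)]
  | k + 1 =>
    if PySem.Str.isIn "Total Marks" (cleaned_texts.getD k "") then
      [("total_marks", PySem.List.pyGet? cleaned_texts ((k : Int) + 2)),
       ("obtained_marks", PySem.List.pyGet? cleaned_texts ((k : Int) + 1))]
    else pvAltLoop cleaned_texts k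

def extract_total_marks_in_figures_alt (cleaned_texts : List String) : List (String × Option String) :=
  pvAltLoop cleaned_texts cleaned_texts.length

-- ===== PRECONDITION & SPEC =====
-- Pre_ excludes exactly the inputs on which Python A raises IndexError: a line containing
-- "Total Marks" within the last two positions (so cleaned_texts[i+1] or [i+2] is out of range).
def Pre_extract_total_marks_in_figures (cleaned_texts : List String) : Prop :=
  ∀ i ∈ List.range cleaned_texts.length,
    PySem.Str.isIn "Total Marks" (cleaned_texts.getD i "") = true → i + 2 < cleaned_texts.length
instance (cleaned_texts : List String) : Decidable (Pre_extract_total_marks_in_figures cleaned_texts) := by unfold Pre_extract_total_marks_in_figures; infer_instance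

def pvWitness_extract_total_marks_in_figures : List String :=
  ["header", "Total Marks", "95", "100"]

def Spec_extract_total_marks_in_figures (cleaned_texts : List String) (out : List (String × Option String)) : Prop := out = extract_total_marks_in_figures_alt cleaned_texts
instance (cleaned_texts : List String) (out : List (String × Option String)) : Decidable (Spec_extract_total_marks_in_figures cleaned_texts out) := by unfold Spec_extract_total_marks_in_figures; infer_instance

-- ===== CLAIM (what is proved, stated in full; the proofs are below) =====
def Claim_equal_extract_total_marks_in_figures : Prop := ∀ (cleaned_texts : List String), Dom_extract_total_marks_in_figures cleaned_texts → Pre_extract_total_marks_in_figures cleaned_texts → Spec_extract_total_marks_in_figures cleaned_texts (extract_total_marks_in_figures cleaned_texts)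

-- ===== LEMMAS AND PROOFS =====

-- proof-side generalisation of B's loop: arbitrary "not found" result
def pvLoopG (cleaned_texts : List String) (a b : Option String) : Nat → List (String × Option String)
  | 0 => [("total_marks", a), ("obtained_marks", b)]
  | k + 1 =>
    if PySem.Str.isIn "Total Marks" (cleaned_texts.getD k "") then
      [("total_marks", PySem.List.pyGet? cleaned_texts ((k : Int) + 2)),
       ("obtained_marks", PySem.List.pyGet? cleaned_texts ((k : Int) + 1))]
    else pvLoopG cleaned_texts a b k

lemma pvLoopG_none (xs : List String) (n : Nat) : pvLoopG xs none none n = pvAltLoop xs n := by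
  induction n with
  | zero => rfl
  | succ k ih => simp only [pvLoopG, pvAltLoop, ih]

lemma pvLoopG_shape (xs : List String) (a b : Option String) (n : Nat) :
    ∃ x y, pvLoopG xs a b n = [("total_marks", x), ("obtained_marks", y)] := by
  induction n with
  | zero => exact ⟨a, b, rfl⟩
  | succ k ih =>
    by_cases h : PySem.Str.isIn "Total Marks" (xs.getD k "") = true
    · exact ⟨_, _, by rw [pvLoopG, if_pos h]⟩
    · simpa only [pvLoopG, h, if_false, Bool.not_eq_true] using ih

lemma pvMain (xs : List String) :
    ∀ n, n ≤ xs.length → ∀ a b : Option String,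
      ((PySem.List.enumerate (xs.take n)).foldl
        (fun (d : PySem.Dict String (Option String)) p =>
          if PySem.Str.isIn "Total Marks" p.2 then
            (d.insert "obtained_marks" (PySem.List.pyGet? xs (p.1 + 1))).insert
              "total_marks" (PySem.List.pyGet? xs (p.1 + 2))
          else d)
        (PySem.Dict.mk [("total_marks", a), ("obtained_marks", b)])).items
      = pvLoopG xs a b n := by
  intro n
  induction n with
  | zero => intro _ a b; rfl
  | succ k ih =>
    intro hk a b
    have hklt : k < xs.length := Nat.lt_of_succ_le hk
    have hget : xs[k] = xs.getD k "" := (List.getD_eq_getElem xs "" hklt).symm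
    have htake : xs.take (k + 1) = xs.take k ++ [xs.getD k ""] := by
      rw [List.take_add_one, List.getElem?_eq_getElem hklt, hget]; rfl
    have hlen : ((xs.take k).length : Int) = (k : Int) := by
      simp [List.length_take_of_le (Nat.le_of_lt hklt)]
    rw [htake, PySem.List.enumerate_append, List.foldl_append,
      PySem.List.enumerate_cons, PySem.List.enumerate_nil, hlen,
      List.foldl_cons, List.foldl_nil]
    by_cases h : PySem.Str.isIn "Total Marks" (xs.getD k "") = true
    · obtain ⟨x, y, hxy⟩ := pvLoopG_shape xs a b k
      have hD : (PySem.List.enumerate (xs.take k)).foldl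
          (fun (d : PySem.Dict String (Option String)) p =>
            if PySem.Str.isIn "Total Marks" p.2 then
              (d.insert "obtained_marks" (PySem.List.pyGet? xs (p.1 + 1))).insert
                "total_marks" (PySem.List.pyGet? xs (p.1 + 2))
            else d)
          (PySem.Dict.mk [("total_marks", a), ("obtained_marks", b)])
          = PySem.Dict.mk [("total_marks", x), ("obtained_marks", y)] := by
        apply PySem.Dict.ext
        rw [ih (Nat.le_of_lt hklt) a b, hxy]
      rw [pvLoopG, if_pos h]
      simp only [hD, if_pos h]
      simp [PySem.Dict.items_insert, PySem.Dict.contains_insert, PySem.Dict.contains_mk]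
    · rw [pvLoopG, if_neg h]
      simp only [if_neg h]
      exact ih (Nat.le_of_lt hklt) a b

-- ===== VERDICT (by name: the statement is the Claim_ definition above) =====
theorem extract_total_marks_in_figures_spec : Claim_equal_extract_total_marks_in_figures := by
  intro xs _ _
  unfold Spec_extract_total_marks_in_figures extract_total_marks_in_figures
    extract_total_marks_in_figures_alt
  have := pvMain xs xs.length (Nat.le_refl _) none none
  rw [List.take_length] at this
  rw [this, pvLoopG_none]
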